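-- pv_equiv track=rewrite | github.com/qiqi/aft-sa | src/grid/coarsening.py | max_levels
-- ===== SOURCE A (Python) =====
-- def max_levels(NI: int, NJ: int, min_size: int = 4) -> int:
--     """
--     Compute maximum number of multigrid levels.
--
--     Parameters
--     ----------
--     NI, NJ : int
--         Fine grid dimensions.
--     min_size : int
--         Minimum cells in each direction on coarsest level.
--
--     Returns
--     -------
--     int
--         Maximum number of levels (including finest).
--     """
--     levels = 1
--     ni, nj = NI, NJ
--
--     while ni >= 2 * min_size and nj >= 2 * min_size:
--         ni = ni // 2
--         nj = nj // 2
--         levels += 1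
--
--     return levels
-- ===== SOURCE B (Python) =====
-- def max_levels(NI: int, NJ: int, min_size: int = 4) -> int:
--     m0 = min(NI, NJ)
--     if min_size > 0 and 2 * min_size <= m0:
--         return (m0 // (2 * min_size)).bit_length() + 1
--     return 1
-- ===== Notes on version B (the rewrite author's own statement) =====
-- stated objective: faster
-- what changed: Replaced the iterative halving loop with a closed form: levels = bit_length(min(NI,NJ) // (2*min_size)) + 1, since repeated floor-halving of min(NI,NJ) equals division by a power of two.
-- outside the precondition, e.g. on max_levels(32, 32, 0): A does not finish within the time limit, B returns 1
import Mathlib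
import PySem

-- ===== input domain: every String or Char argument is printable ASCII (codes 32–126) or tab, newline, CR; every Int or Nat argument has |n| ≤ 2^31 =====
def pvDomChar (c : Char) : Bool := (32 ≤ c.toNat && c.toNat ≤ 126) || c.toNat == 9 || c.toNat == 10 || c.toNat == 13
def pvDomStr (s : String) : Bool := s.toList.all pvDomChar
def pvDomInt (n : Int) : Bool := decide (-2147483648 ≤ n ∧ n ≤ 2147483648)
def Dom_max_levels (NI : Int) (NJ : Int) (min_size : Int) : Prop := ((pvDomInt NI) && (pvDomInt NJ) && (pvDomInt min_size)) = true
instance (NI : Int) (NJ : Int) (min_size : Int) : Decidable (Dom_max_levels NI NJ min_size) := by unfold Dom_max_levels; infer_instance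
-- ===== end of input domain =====

-- B replaces A's halving loop by the closed form bit_length(min(NI,NJ) // (2*min_size)) + 1 (objective: faster, constant-factor).

-- ===== PORT A =====
-- fuel-bounded transcription of A's while loop (fuel only makes it total; inside Pre_ it never runs out)
def maxLevelsLoop : Nat → Int → Int → Int → Int → Int
  | 0, _, _, _, levels => levels
  | f + 1, ni, nj, min_size, levels =>
    if 2 * min_size ≤ ni ∧ 2 * min_size ≤ nj then
      maxLevelsLoop f (PySem.Int.floordiv ni 2) (PySem.Int.floordiv nj 2) min_size (levels + 1)
    else levels

def max_levels (NI : Int) (NJ : Int) (min_size : Int) : Int :=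
  maxLevelsLoop (Nat.size NI.toNat + 1) NI NJ min_size 1

-- ===== PORT B =====
def max_levels_alt (NI : Int) (NJ : Int) (min_size : Int) : Int :=
  let m0 := min NI NJ
  if 0 < min_size ∧ 2 * min_size ≤ m0 then
    (PySem.Int.bitLength (PySem.Int.floordiv m0 (2 * min_size)) : Int) + 1
  else 1

-- ===== PRECONDITION & SPEC =====
-- Pre_ excludes exactly the inputs on which Python A never returns: min_size ≤ 0 with both
-- dimensions ≥ 2*min_size makes the while loop run forever (halving converges to 0 or -1,
-- which still satisfies the loop condition).
def Pre_max_levels (NI : Int) (NJ : Int) (min_size : Int) : Prop :=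
  0 < min_size ∨ NI < 2 * min_size ∨ NJ < 2 * min_size
instance (NI : Int) (NJ : Int) (min_size : Int) : Decidable (Pre_max_levels NI NJ min_size) := by
  unfold Pre_max_levels; infer_instance

def pvWitness_max_levels : Int × Int × Int := (32, 32, 4)

def Spec_max_levels (NI : Int) (NJ : Int) (min_size : Int) (out : Int) : Prop := out = max_levels_alt NI NJ min_size
instance (NI : Int) (NJ : Int) (min_size : Int) (out : Int) : Decidable (Spec_max_levels NI NJ min_size out) := by unfold Spec_max_levels; infer_instance

-- ===== CLAIM (what is proved, stated in full; the proofs are below) =====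
def Claim_equal_max_levels : Prop := ∀ (NI : Int) (NJ : Int) (min_size : Int), Dom_max_levels NI NJ min_size → Pre_max_levels NI NJ min_size → Spec_max_levels NI NJ min_size (max_levels NI NJ min_size)

-- ===== LEMMAS AND PROOFS =====

-- closed-form value of the loop tail, as a function of min ni nj
def mlTail (m0 m : Int) : Int :=
  if 2 * m ≤ m0 then (PySem.Int.bitLength (PySem.Int.floordiv m0 (2 * m)) : Int) else 0

lemma floordiv_halve (a : Int) (m : Int) (hm : 0 < m) :
    PySem.Int.floordiv (PySem.Int.floordiv a 2) (2 * m)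
      = PySem.Int.floordiv (PySem.Int.floordiv a (2 * m)) 2 := by
  rw [PySem.Int.floordiv_eq_ediv_of_pos (a := a) (by omega),
      PySem.Int.floordiv_eq_ediv_of_pos (a := a) (by omega),
      PySem.Int.floordiv_eq_ediv_of_pos (by omega),
      PySem.Int.floordiv_eq_ediv_of_pos (by omega),
      Int.ediv_ediv_of_nonneg (by omega : (0:Int) ≤ 2), Int.ediv_ediv_of_nonneg (by omega : (0:Int) ≤ 2 * m),
      mul_comm 2 (2 * m)]

lemma mlTail_step (m0 m : Int) (hm : 0 < m) (h : 2 * m ≤ m0) :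
    mlTail m0 m = 1 + mlTail (PySem.Int.floordiv m0 2) m := by
  have hq : (1 : Int) ≤ PySem.Int.floordiv m0 (2 * m) := by
    rw [PySem.Int.le_floordiv_iff_mul_le (by omega)]; omega
  have hhalf : 2 * m ≤ PySem.Int.floordiv m0 2 ↔ (2 : Int) ≤ PySem.Int.floordiv m0 (2 * m) := by
    rw [PySem.Int.le_floordiv_iff_mul_le (by omega), PySem.Int.le_floordiv_iff_mul_le (by omega)]
    omega
  unfold mlTail
  rw [if_pos h, floordiv_halve m0 m hm]
  by_cases h2 : (2 : Int) ≤ PySem.Int.floordiv m0 (2 * m)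
  · rw [if_pos (hhalf.mpr h2),
        PySem.Int.bitLength_of_pos (n := PySem.Int.floordiv m0 (2 * m)) (by omega)]
    push_cast; ring
  · -- q = 1
    have hq1 : PySem.Int.floordiv m0 (2 * m) = 1 := by omega
    rw [if_neg (by rw [hhalf]; omega), hq1]
    decide

lemma size_half (q : Nat) (h : q ≠ 0) : Nat.size q = Nat.size (q / 2) + 1 := by
  conv_lhs => rw [← Nat.bit_bodd_div2 q]
  rw [Nat.size_bit (by rwa [Nat.bit_bodd_div2]), Nat.div2_val]

lemma loop_eq_tail : ∀ (f : Nat) (ni nj m levels : Int), 0 < m → Nat.size ni.toNat < f →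
    maxLevelsLoop f ni nj m levels = levels + mlTail (min ni nj) m := by
  intro f
  induction f with
  | zero => intro ni nj m levels hm hf; omega
  | succ f ih =>
    intro ni nj m levels hm hf
    by_cases hc : 2 * m ≤ ni ∧ 2 * m ≤ nj
    · have hni : (2 : Int) ≤ ni := by omega
      have hnj : (2 : Int) ≤ nj := by omega
      have hdni : PySem.Int.floordiv ni 2 = ni / 2 := PySem.Int.floordiv_eq_ediv_of_pos (by omega)
      have hdnj : PySem.Int.floordiv nj 2 = nj / 2 := PySem.Int.floordiv_eq_ediv_of_pos (by omega)
      have htd : (ni / 2).toNat = ni.toNat / 2 := by omega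
      have hlt : Nat.size ((ni / 2).toNat) < f := by
        rw [htd]
        have := size_half ni.toNat (by omega)
        omega
      have hminhalf : min (PySem.Int.floordiv ni 2) (PySem.Int.floordiv nj 2)
          = PySem.Int.floordiv (min ni nj) 2 := by
        rcases le_total ni nj with hle | hle
        · rw [min_eq_left hle, min_eq_left]
          rw [hdni, hdnj]; exact Int.ediv_le_ediv (by omega) hle
        · rw [min_eq_right hle, min_eq_right]
          rw [hdni, hdnj]; exact Int.ediv_le_ediv (by omega) hle
      rw [maxLevelsLoop, if_pos hc, ih _ _ _ _ hm (by rw [hdni]; exact hlt), hminhalf,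
          mlTail_step (min ni nj) m hm (by omega)]
      ring
    · rw [maxLevelsLoop, if_neg hc]
      have : min ni nj < 2 * m := by omega
      unfold mlTail
      rw [if_neg (by omega)]
      ring

-- ===== VERDICT (by name: the statement is the Claim_ definition above) =====
theorem max_levels_spec : Claim_equal_max_levels := by
  intro NI NJ m _hdom hpre
  unfold Spec_max_levels max_levels max_levels_alt
  by_cases hc : 2 * m ≤ NI ∧ 2 * m ≤ NJ
  · have hm : 0 < m := by
      rcases hpre with h | h | h
      · exact h
      · omega
      · omega
    rw [loop_eq_tail (Nat.size NI.toNat + 1) NI NJ m 1 hm (by omega)]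
    unfold mlTail
    rw [if_pos (by omega), if_pos ⟨hm, by omega⟩]
    ring
  · have h1 : maxLevelsLoop (Nat.size NI.toNat + 1) NI NJ m 1 = 1 := by
      rw [maxLevelsLoop, if_neg hc]
    rw [h1, if_neg (by intro ⟨_, hmin⟩; simp only [le_min_iff] at hmin; omega)]
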